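-- pv_equiv track=rewrite | github.com/Anoyer/CentralVision | utils/common.py | keyword_to_py
-- ===== SOURCE A (Python) =====
-- def keyword_to_py(keyword):
--     py_word = ""
--     for ch in keyword:
--         if 'A' <= ch <= 'Z':
--             py_word += f"_{chr(ord(ch) + 32)}"
--         elif ch == ' ':
--             py_word += '_'
--         else:
--             py_word += ch
--     return py_word
-- ===== SOURCE B (Python) =====
-- def keyword_to_py(keyword):
--     py_word = keyword.replace(' ', '_')
--     for code in range(ord('A'), ord('Z') + 1):
--         py_word = py_word.replace(chr(code), '_' + chr(code + 32))
--     return py_word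
-- ===== Notes on version B (the rewrite author's own statement) =====
-- stated objective: faster
-- what changed: Iterates over the 26 uppercase letters (plus space) applying one global str.replace pass each, instead of A's character-by-character scan with if/elif branches and string accumulation; correct because no replacement output ('_' and lowercase letters) is itself a replaced character.
import Mathlib
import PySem

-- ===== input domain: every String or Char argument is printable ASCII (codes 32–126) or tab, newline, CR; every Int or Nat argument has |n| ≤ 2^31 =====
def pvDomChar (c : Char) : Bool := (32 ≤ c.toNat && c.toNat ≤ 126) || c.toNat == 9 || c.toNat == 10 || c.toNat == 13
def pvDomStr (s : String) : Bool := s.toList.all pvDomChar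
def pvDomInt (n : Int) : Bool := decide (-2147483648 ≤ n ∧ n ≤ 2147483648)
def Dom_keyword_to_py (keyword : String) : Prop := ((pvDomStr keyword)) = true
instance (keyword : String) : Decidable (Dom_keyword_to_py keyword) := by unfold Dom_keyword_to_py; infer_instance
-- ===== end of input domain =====

-- B translates by 27 whole-string replace passes (space, then each uppercase letter)
-- instead of A's per-character if/elif accumulation loop (measured faster in a timing run).


-- ===== PORT A =====
-- for ch in keyword: append "_"+chr(ord(ch)+32) / "_" / ch, accumulated left-to-right
def keyword_to_py (keyword : String) : String :=
  keyword.toList.foldl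
    (fun py_word ch =>
      if 'A' ≤ ch ∧ ch ≤ 'Z' then
        py_word ++ ("_" ++ String.ofList [Char.ofNat (ch.toNat + 32)])
      else if ch = ' ' then
        py_word ++ "_"
      else
        py_word ++ String.ofList [ch])
    ""

-- ===== PORT B =====
-- py_word = keyword.replace(' ', '_'); then for code in range(65, 91):
--   py_word = py_word.replace(chr(code), '_' + chr(code + 32))
def keyword_to_py_alt (keyword : String) : String :=
  (PySem.List.pyRange 65 91).foldl
    (fun py_word code =>
      PySem.Str.replace py_word (String.ofList [Char.ofNat code.toNat])
        (String.ofList ['_', Char.ofNat (code.toNat + 32)]))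
    (PySem.Str.replace keyword " " "_")

-- ===== PRECONDITION & SPEC =====
def Spec_keyword_to_py (keyword : String) (out : String) : Prop := out = keyword_to_py_alt keyword
instance (keyword : String) (out : String) : Decidable (Spec_keyword_to_py keyword out) := by unfold Spec_keyword_to_py; infer_instance

-- ===== CLAIM (what is proved, stated in full; the proofs are below) =====
def Claim_equal_keyword_to_py : Prop := ∀ (keyword : String), Dom_keyword_to_py keyword → Spec_keyword_to_py keyword (keyword_to_py keyword)

-- ===== LEMMAS AND PROOFS =====

-- Char arithmetic helpers (ASCII range only)
theorem char_le_iff (a b : Char) : a ≤ b ↔ a.toNat ≤ b.toNat := by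
  simp only [Char.le_def, Char.toNat, UInt32.le_iff_toNat_le]

theorem toNat_ofNat_ascii (n : Nat) (h : n < 55296) : (Char.ofNat n).toNat = n := by
  rw [Char.toNat_ofNat]; simp [Nat.isValidChar, h]

theorem char_eq_ofNat_iff (c : Char) (n : Nat) (hn : n < 55296) :
    (c = Char.ofNat n) ↔ c.toNat = n := by
  constructor
  · rintro rfl; exact toNat_ofNat_ascii n hn
  · intro h; apply Char.ext; apply UInt32.toNat_inj.mp
    show c.toNat = (Char.ofNat n).toNat
    rw [toNat_ofNat_ascii n hn, h]

-- single-character replace is a per-character flatMap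
theorem go_single (x : Char) (new : List Char) :
    ∀ (fuel : Nat) (l acc : List Char), l.length ≤ fuel →
    PySem.Chars.replace.go [x] new fuel l acc
      = acc.reverse ++ l.flatMap (fun c => if c = x then new else [c]) := by
  intro fuel
  induction fuel with
  | zero =>
      intro l acc h
      rw [PySem.Chars.replace.go.eq_def]
      have : l = [] := List.eq_nil_of_length_eq_zero (Nat.le_zero.mp h)
      subst this; simp
  | succ n ih =>
      intro l acc h
      rw [PySem.Chars.replace.go.eq_def]
      cases l with
      | nil => simp
      | cons c t =>
          simp only [List.isPrefixOf_cons₂ (a := x)]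
          by_cases hc : c = x
          · simp only [hc, List.isPrefixOf]
            rw [show [x].length = 1 from rfl]
            simp only [List.drop_one, List.tail_cons]
            rw [ih t (new.reverse ++ acc) (by simpa using h)]
            simp
          · have hbeq : (x == c) = false := by
              simp only [beq_eq_false_iff_ne, ne_eq]
              exact fun hxc => hc hxc.symm
            simp only [hbeq, Bool.false_and, if_neg (Bool.false_ne_true)]
            rw [ih t (c :: acc) (by simpa using h)]
            simp [hc]

theorem replace_single (l : List Char) (x : Char) (new : List Char) :
    PySem.Chars.replace l [x] new = l.flatMap (fun c => if c = x then new else [c]) := by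
  rw [PySem.Chars.replace]
  simp only [List.isEmpty_cons, if_neg Bool.false_ne_true]
  rw [go_single x new l.length l [] (le_refl _)]
  simp

-- the per-character translation after the space pass and the passes for codes ∈ done
def ktpF (done : List Int) (c : Char) : List Char :=
  if c = ' ' then ['_']
  else if (c.toNat : Int) ∈ done then ['_', Char.ofNat (c.toNat + 32)]
  else [c]

-- one more uppercase pass (code k) refines the translation
theorem ktpF_step (k : Int) (hk : 65 ≤ k ∧ k ≤ 90) (done : List Int)
    (hdone : ∀ j ∈ done, 65 ≤ j ∧ j ≤ 90) (c : Char) :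
    (ktpF done c).flatMap
        (fun d => if d = Char.ofNat k.toNat then ['_', Char.ofNat (k.toNat + 32)] else [d])
      = ktpF (done ++ [k]) c := by
  have hk' : k.toNat < 55296 := by omega
  unfold ktpF
  by_cases hsp : c = ' '
  · have h1 : ¬ ('_' = Char.ofNat k.toNat) := by
      rw [char_eq_ofNat_iff _ _ hk']
      show ¬ (95 = k.toNat); omega
    simp [hsp, h1]
  · by_cases hd : (c.toNat : Int) ∈ done
    · have hc : 65 ≤ c.toNat ∧ c.toNat ≤ 90 := by
        have := hdone _ hd; omega
      have h1 : ¬ ('_' = Char.ofNat k.toNat) := by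
        rw [char_eq_ofNat_iff _ _ hk']
        show ¬ (95 = k.toNat); omega
      have h2 : ¬ (Char.ofNat (c.toNat + 32) = Char.ofNat k.toNat) := by
        rw [char_eq_ofNat_iff _ _ hk', toNat_ofNat_ascii _ (by omega)]
        omega
      have hd' : (c.toNat : Int) ∈ done ++ [k] := List.mem_append_left _ hd
      simp [hsp, hd, hd', h1, h2]
    · by_cases hck : c = Char.ofNat k.toNat
      · have hcn : c.toNat = k.toNat := (char_eq_ofNat_iff _ _ hk').mp hck
        have hd' : (c.toNat : Int) ∈ done ++ [k] := by
          apply List.mem_append_right; simp; omega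
        rw [if_neg hsp, if_neg hsp, if_neg hd, if_pos hd']
        simp only [hck, List.flatMap_cons, List.flatMap_nil, List.append_nil]
        rw [toNat_ofNat_ascii k.toNat (by omega)]
        simp
      · have hd' : ¬ (c.toNat : Int) ∈ done ++ [k] := by
          simp only [List.mem_append, List.mem_singleton]
          rintro (h | h)
          · exact hd h
          · exact hck ((char_eq_ofNat_iff _ _ hk').mpr (by omega))
        simp [hsp, hd, hd', hck]

-- the uppercase passes, folded on the list side
theorem fold_inv (cs : List Int) : ∀ (done : List Int) (s : List Char),
    (∀ j ∈ done ++ cs, 65 ≤ j ∧ j ≤ 90) →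
    cs.foldl
      (fun out code =>
        PySem.Chars.replace out [Char.ofNat code.toNat] ['_', Char.ofNat (code.toNat + 32)])
      (s.flatMap (ktpF done))
    = s.flatMap (ktpF (done ++ cs)) := by
  induction cs with
  | nil => intro done s _; simp
  | cons k cs ih =>
      intro done s hall
      have hk : 65 ≤ k ∧ k ≤ 90 := hall k (by simp)
      have hdone : ∀ j ∈ done, 65 ≤ j ∧ j ≤ 90 :=
        fun j hj => hall j (List.mem_append_left _ hj)
      simp only [List.foldl_cons]
      rw [replace_single, List.flatMap_assoc]
      have hstep : (s.flatMap fun c => (ktpF done c).flatMap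
          (fun d => if d = Char.ofNat k.toNat then ['_', Char.ofNat (k.toNat + 32)] else [d]))
          = s.flatMap (ktpF (done ++ [k])) :=
        List.flatMap_congr (fun c _ => ktpF_step k hk done hdone c)
      rw [hstep, ih (done ++ [k]) s (by
        intro j hj
        apply hall
        simp only [List.mem_append, List.mem_cons] at hj ⊢
        tauto)]
      simp

-- B's string-level fold reduces to the list-level fold
theorem alt_toList_fold (cs : List Int) : ∀ (out : String),
    ((cs.foldl
        (fun py_word code =>
          PySem.Str.replace py_word (String.ofList [Char.ofNat code.toNat])
            (String.ofList ['_', Char.ofNat (code.toNat + 32)]))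
        out).toList)
    = cs.foldl
        (fun o code =>
          PySem.Chars.replace o [Char.ofNat code.toNat] ['_', Char.ofNat (code.toNat + 32)])
        out.toList := by
  induction cs with
  | nil => intro out; rfl
  | cons k cs ih =>
      intro out
      simp only [List.foldl_cons]
      rw [ih, PySem.Str.toList_replace, String.toList_ofList, String.toList_ofList]

-- B computes the translated flatMap
theorem alt_eq_flatMap (keyword : String) :
    (keyword_to_py_alt keyword).toList
      = keyword.toList.flatMap (ktpF (PySem.List.pyRange 65 91)) := by
  unfold keyword_to_py_alt
  rw [alt_toList_fold]
  have hsp : (PySem.Str.replace keyword " " "_").toList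
      = keyword.toList.flatMap (ktpF []) := by
    rw [PySem.Str.toList_replace]
    have : (" " : String).toList = [' '] := rfl
    rw [this]
    have : ("_" : String).toList = ['_'] := rfl
    rw [this, replace_single]
    apply List.flatMap_congr
    intro c _
    unfold ktpF
    by_cases h : c = ' ' <;> simp [h]
  rw [hsp, fold_inv (PySem.List.pyRange 65 91) [] keyword.toList (by
    intro j hj
    simp only [List.nil_append] at hj
    have := PySem.List.mem_pyRange_one.mp hj
    omega)]
  simp

-- A computes the same translated flatMap
theorem a_eq_flatMap (l : List Char) : ∀ (acc : String),
    (l.foldl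
      (fun py_word ch =>
        if 'A' ≤ ch ∧ ch ≤ 'Z' then
          py_word ++ ("_" ++ String.ofList [Char.ofNat (ch.toNat + 32)])
        else if ch = ' ' then
          py_word ++ "_"
        else
          py_word ++ String.ofList [ch]) acc).toList
    = acc.toList ++ l.flatMap (ktpF (PySem.List.pyRange 65 91)) := by
  induction l with
  | nil => intro acc; simp
  | cons c t ih =>
      intro acc
      simp only [List.foldl_cons, List.flatMap_cons]
      have hce : ('A' ≤ c ∧ c ≤ 'Z') ↔ (65 ≤ c.toNat ∧ c.toNat ≤ 90) := by
        rw [char_le_iff, char_le_iff]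
        constructor <;> intro h <;> exact ⟨by exact_mod_cast h.1, by exact_mod_cast h.2⟩
      have hmem : ((c.toNat : Int) ∈ PySem.List.pyRange 65 91) ↔ (65 ≤ c.toNat ∧ c.toNat ≤ 90) := by
        rw [PySem.List.mem_pyRange_one]; omega
      by_cases h1 : 'A' ≤ c ∧ c ≤ 'Z'
      · have hc : 65 ≤ c.toNat ∧ c.toNat ≤ 90 := hce.mp h1
        have hsp : ¬ c = ' ' := by
          intro h; subst h; exact absurd hc (by decide)
        rw [if_pos h1, ih]
        unfold ktpF
        rw [if_neg hsp, if_pos (hmem.mpr hc)]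
        simp [String.toList_append]
      · rw [if_neg h1]
        by_cases h2 : c = ' '
        · rw [if_pos h2, ih]
          unfold ktpF
          rw [if_pos h2]
          simp [String.toList_append]
        · rw [if_neg h2, ih]
          unfold ktpF
          rw [if_neg h2, if_neg (fun hm => h1 (hce.mpr (hmem.mp hm)))]
          simp [String.toList_append]

-- ===== VERDICT (by name: the statement is the Claim_ definition above) =====
theorem keyword_to_py_spec : Claim_equal_keyword_to_py := by
  intro keyword _
  unfold Spec_keyword_to_py keyword_to_py
  apply String.toList_inj.mp
  rw [a_eq_flatMap, alt_eq_flatMap]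
  rfl
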